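-- pv_equiv track=rewrite | github.com/krimeano/aoc2020 | day6/solution6.py | solve_6_2
-- ===== SOURCE A (Python) =====
-- def solve_6_2(data) -> int:
--     out = 0
--     for group in data:
--         users = [set([x for x in user]) for user in group.strip().split('\n')]
--         group_selected = users.pop()
--         while users:
--             group_selected = group_selected.intersection(users.pop())
--         out += len(group_selected)
--     return out
-- ===== SOURCE B (Python) =====
-- def solve_6_2(data) -> int:
--     out = 0
--     for group in data:
--         lines = group.strip().split('\n')
--         n = len(lines)
--         freq = {}
--         for line in lines:
--             for c in set(line):
--                 freq[c] = freq.get(c, 0) + 1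
--         out += sum(1 for v in freq.values() if v == n)
--     return out
-- ===== Notes on version B (the rewrite author's own statement) =====
-- stated objective: alternative
-- what changed: Replaces the pop-and-intersect reduction over per-user sets with a single frequency-counting pass: a dict counts in how many users each letter occurs and the group contributes the number of letters whose count equals the number of users.
import Mathlib
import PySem

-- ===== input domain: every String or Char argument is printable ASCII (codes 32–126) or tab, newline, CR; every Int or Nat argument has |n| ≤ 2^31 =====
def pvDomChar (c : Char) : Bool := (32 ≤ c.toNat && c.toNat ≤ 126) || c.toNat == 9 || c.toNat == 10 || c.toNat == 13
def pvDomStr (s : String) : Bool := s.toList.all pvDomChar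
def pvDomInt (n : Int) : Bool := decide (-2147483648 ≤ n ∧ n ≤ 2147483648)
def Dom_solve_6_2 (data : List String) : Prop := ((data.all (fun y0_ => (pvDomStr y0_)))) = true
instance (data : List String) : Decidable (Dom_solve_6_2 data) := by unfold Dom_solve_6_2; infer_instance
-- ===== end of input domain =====

-- B replaces A's pop-and-intersect reduction over per-user sets by one counting pass
-- (letters occurring in as many users as the group has); same cost, different algorithm.

-- ===== PORT A =====
-- per group: users = [set(user) for user in group.strip().split('\n')]; pop the last,
-- intersect with the remaining sets popped from the end, add the size.
-- split('\n') is never empty, so the 'users = []' match arm is unreachable (Python's pop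
-- would raise IndexError there); it returns out unchanged only to make the match total.
def solve_6_2 (data : List String) : Int :=
  data.foldl (fun out group =>
    let users := (PySem.Chars.splitOn (PySem.Chars.strip group.toList) ['\n']).map
        (fun user => PySem.Set.ofList user)
    match users.reverse with
    | [] => out
    | g :: rest => out + PySem.Set.len (rest.foldl PySem.Set.inter g)) 0

-- ===== PORT B =====
-- per group: n = number of lines; freq counts, per letter, in how many lines' sets it
-- occurs; add the number of dict values equal to n.
def solve_6_2_alt (data : List String) : Int :=
  data.foldl (fun out group =>
    let lines := PySem.Chars.splitOn (PySem.Chars.strip group.toList) ['\n']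
    let n := lines.length
    let freq := lines.foldl (fun d line =>
        (PySem.Set.ofList line).foldl (fun d c => d.insert c (d.getD c 0 + 1)) d)
      (PySem.Dict.empty)
    out + ((freq.values.filter (fun v => v == (n : Int))).length : Int)) 0

-- ===== PRECONDITION & SPEC =====
def Spec_solve_6_2 (data : List String) (out : Int) : Prop := out = solve_6_2_alt data
instance (data : List String) (out : Int) : Decidable (Spec_solve_6_2 data out) := by unfold Spec_solve_6_2; infer_instance

-- ===== CLAIM (what is proved, stated in full; the proofs are below) =====
def Claim_equal_solve_6_2 : Prop := ∀ (data : List String), Dom_solve_6_2 data → Spec_solve_6_2 data (solve_6_2 data)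

-- ===== LEMMAS AND PROOFS =====

-- splitOn never returns the empty list (Python's str.split always yields ≥ 1 piece)
theorem splitOn_go_ne_nil (sep : List Char) (fuel : Nat) (l cur : List Char)
    (acc : List (List Char)) : PySem.Chars.splitOn.go sep fuel l cur acc ≠ [] := by
  induction fuel generalizing l cur acc with
  | zero => simp [PySem.Chars.splitOn.go]
  | succ fuel ih =>
    cases l with
    | nil => simp [PySem.Chars.splitOn.go]
    | cons c rest =>
      rw [PySem.Chars.splitOn.go]
      split
      · exact ih _ _ _
      · exact ih _ _ _

theorem splitOn_ne_nil (s sep : List Char) : PySem.Chars.splitOn s sep ≠ [] :=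
  splitOn_go_ne_nil sep _ s [] []

-- membership in the pop-and-intersect fold
theorem mem_foldl_inter (rest : List (PySem.Set Char)) (g : PySem.Set Char) (x : Char) :
    x ∈ rest.foldl PySem.Set.inter g ↔ x ∈ g ∧ ∀ s ∈ rest, x ∈ s := by
  induction rest generalizing g with
  | nil => simp
  | cons s rest ih =>
    simp [List.foldl_cons, ih, PySem.Set.mem_inter]
    tauto

theorem nodup_foldl_inter (rest : List (PySem.Set Char)) (g : PySem.Set Char)
    (hg : g.Nodup) : (rest.foldl PySem.Set.inter g).Nodup := by
  induction rest generalizing g with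
  | nil => exact hg
  | cons s rest ih => exact ih _ (PySem.Set.nodup_inter _ _ hg)

-- nested fold over per-line sets = fold over their concatenation
theorem foldl_flatMap {α β γ : Type} (f : γ → β → γ) (g : α → List β)
    (l : List α) (init : γ) :
    (l.flatMap g).foldl f init = l.foldl (fun d a => (g a).foldl f d) init := by
  induction l generalizing init with
  | nil => rfl
  | cons a l ih => simp [List.flatMap_cons, List.foldl_append, ih]

-- counting in the flattened per-line distinct letters = number of lines containing x
theorem count_flat (lines : List (List Char)) (x : Char) :
    (lines.flatMap (fun l => PySem.Set.ofList l)).count x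
      = lines.countP (fun l => decide (x ∈ l)) := by
  induction lines with
  | nil => rfl
  | cons l lines ih =>
    rw [List.flatMap_cons, List.count_append, List.countP_cons, ih]
    by_cases hx : x ∈ l
    · have hmem : x ∈ PySem.Set.ofList l := (PySem.Set.mem_ofList l x).mpr hx
      rw [List.count_eq_one_of_mem (PySem.Set.nodup_ofList l) hmem]
      simp [hx]
      omega
    · have hmem : x ∉ PySem.Set.ofList l := fun h => hx ((PySem.Set.mem_ofList l x).mp h)
      rw [List.count_eq_zero_of_not_mem hmem]
      simp [hx]

-- the per-group values agree
theorem group_eq (lines : List (List Char)) (hne : lines ≠ []) (out : Int) :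
    (match (lines.map (fun user => PySem.Set.ofList user)).reverse with
      | [] => out
      | g :: rest => out + PySem.Set.len (rest.foldl PySem.Set.inter g))
    = out + ((((lines.foldl (fun d line =>
          (PySem.Set.ofList line).foldl (fun d c => d.insert c (d.getD c 0 + 1)) d)
        (PySem.Dict.empty)).values.filter
          (fun v => v == (lines.length : Int))).length : Int)) := by
  -- B's dict is Counter of the flattened distinct letters
  set L : List Char := lines.flatMap (fun l => PySem.Set.ofList l) with hL
  have hdict : (lines.foldl (fun d line =>
          (PySem.Set.ofList line).foldl (fun d c => d.insert c (d.getD c 0 + 1)) d)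
        (PySem.Dict.empty)) = PySem.Dict.counter L := by
    rw [← PySem.Dict.foldl_insert_getD_add_one_eq_counter, hL, foldl_flatMap]
  rw [hdict]
  -- B's filtered list
  have hvals : (PySem.Dict.counter L).values
      = (PySem.Set.ofList L).map (fun k => ((L.count k : Int))) := by
    have := PySem.Dict.items_counter L
    unfold PySem.Dict.values
    rw [this, List.map_map]
    rfl
  rw [hvals, List.filter_map, List.length_map]
  -- A's match arm
  obtain ⟨g, rest, hrev⟩ : ∃ g rest,
      (lines.map (fun user => PySem.Set.ofList user)).reverse = g :: rest := by
    cases h : (lines.map (fun user => PySem.Set.ofList user)).reverse with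
    | nil =>
      exfalso
      apply hne
      have := congrArg List.reverse h
      simpa using this
    | cons g rest => exact ⟨g, rest, rfl⟩
  rw [hrev]
  -- both sides: out + (length of a nodup list whose membership is "x in every line")
  have hmemA : ∀ x, x ∈ rest.foldl PySem.Set.inter g ↔ ∀ l ∈ lines, x ∈ l := by
    intro x
    rw [mem_foldl_inter]
    constructor
    · rintro ⟨hg, hrest⟩ l hl
      have : PySem.Set.ofList l ∈ g :: rest := by
        rw [← hrev]
        exact List.mem_reverse.mpr (List.mem_map_of_mem hl)
      have hx : x ∈ PySem.Set.ofList l := by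
        rcases this with _ | h
        · exact hg
        · exact hrest _ (by assumption)
      exact (PySem.Set.mem_ofList l x).mp hx
    · intro hall
      have key : ∀ s ∈ g :: rest, x ∈ s := by
        intro s hs
        rw [← hrev, List.mem_reverse, List.mem_map] at hs
        obtain ⟨l, hl, rfl⟩ := hs
        exact (PySem.Set.mem_ofList l x).mpr (hall l hl)
      exact ⟨key g (List.mem_cons_self), fun s hs => key s (List.mem_cons_of_mem _ hs)⟩
  have hndA : (rest.foldl PySem.Set.inter g).Nodup := by
    apply nodup_foldl_inter
    have : g ∈ (lines.map (fun user => PySem.Set.ofList user)).reverse := by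
      rw [hrev]; exact List.mem_cons_self
    rw [List.mem_reverse, List.mem_map] at this
    obtain ⟨l, _, rfl⟩ := this
    exact PySem.Set.nodup_ofList l
  have hmemB : ∀ x, x ∈ (PySem.Set.ofList L).filter
      ((fun v => v == (lines.length : Int)) ∘ fun k => ((L.count k : Int)))
      ↔ ∀ l ∈ lines, x ∈ l := by
    intro x
    rw [List.mem_filter]
    simp only [Function.comp, beq_iff_eq, Nat.cast_inj, PySem.Set.mem_ofList]
    rw [hL]
    constructor
    · rintro ⟨-, hcnt⟩ l hl
      rw [count_flat] at hcnt
      have hcp : lines.countP (fun l => decide (x ∈ l)) = lines.length := by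
        exact_mod_cast hcnt
      have := (List.countP_eq_length (p := fun l => decide (x ∈ l))).mp hcp l hl
      simpa using this
    · intro hall
      obtain ⟨l0, hl0⟩ : ∃ l0, l0 ∈ lines := by
        cases lines with
        | nil => exact absurd rfl hne
        | cons a t => exact ⟨a, List.mem_cons_self⟩
      refine ⟨?_, ?_⟩
      · rw [List.mem_flatMap]
        exact ⟨l0, hl0, (PySem.Set.mem_ofList l0 x).mpr (hall l0 hl0)⟩
      · rw [count_flat]
        have : lines.countP (fun l => decide (x ∈ l)) = lines.length :=
          (List.countP_eq_length).mpr (fun l hl => by simpa using hall l hl)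
        exact_mod_cast this
  have hndB : ((PySem.Set.ofList L).filter
      ((fun v => v == (lines.length : Int)) ∘ fun k => ((L.count k : Int)))).Nodup :=
    (PySem.Set.nodup_ofList L).filter _
  have hperm : (rest.foldl PySem.Set.inter g).Perm
      ((PySem.Set.ofList L).filter
        ((fun v => v == (lines.length : Int)) ∘ fun k => ((L.count k : Int)))) := by
    rw [List.perm_ext_iff_of_nodup hndA hndB]
    intro a
    rw [hmemA, hmemB]
  simp only [PySem.Set.len, hperm.length_eq]

-- the foldl over data with a generalized accumulator
theorem solve_fold_eq (data : List String) (out : Int) :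
    data.foldl (fun out group =>
      let users := (PySem.Chars.splitOn (PySem.Chars.strip group.toList) ['\n']).map
          (fun user => PySem.Set.ofList user)
      match users.reverse with
      | [] => out
      | g :: rest => out + PySem.Set.len (rest.foldl PySem.Set.inter g)) out
    = data.foldl (fun out group =>
      let lines := PySem.Chars.splitOn (PySem.Chars.strip group.toList) ['\n']
      let n := lines.length
      let freq := lines.foldl (fun d line =>
          (PySem.Set.ofList line).foldl (fun d c => d.insert c (d.getD c 0 + 1)) d)
        (PySem.Dict.empty)
      out + ((freq.values.filter (fun v => v == (n : Int))).length : Int)) out := by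
  induction data generalizing out with
  | nil => rfl
  | cons group data ih =>
    simp only [List.foldl_cons]
    rw [group_eq _ (splitOn_ne_nil _ _) out]
    exact ih _

-- ===== VERDICT (by name: the statement is the Claim_ definition above) =====
theorem solve_6_2_spec : Claim_equal_solve_6_2 := by
  intro data _
  unfold Spec_solve_6_2 solve_6_2 solve_6_2_alt
  exact solve_fold_eq data 0
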